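-- pv_equiv track=rewrite | github.com/skeletorflet/anabot | bot.py | parse_infotext
-- ===== SOURCE A (Python) =====
-- def parse_infotext(infotext):
--     data = {}
--     if not infotext:
--         return data
--
--     if "Steps: " in infotext:
--         prompt_part, params_part = infotext.split("Steps: ", 1)
--         params_part = "Steps: " + params_part
--     else:
--         prompt_part = infotext
--         params_part = ""
--
--     if "Negative prompt: " in prompt_part:
--         positive, negative = prompt_part.split("Negative prompt: ", 1)
--         data['prompt'] = positive.strip().rstrip(',')
--         data['negative_prompt'] = negative.strip().rstrip(',')
--     else:
--         data['prompt'] = prompt_part.strip().rstrip(',')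
--         data['negative_prompt'] = ""
--
--     tokens = params_part.split(", ")
--     current_key = None
--     accumulated_value = []
--
--     params = {}
--     for token in tokens:
--         if ": " in token:
--             parts = token.split(": ", 1)
--             possible_key = parts[0]
--             val = parts[1]
--             if current_key:
--                 params[current_key] = ", ".join(accumulated_value)
--             current_key = possible_key
--             accumulated_value = [val]
--         else:
--             if current_key:
--                 accumulated_value.append(token)
--
--     if current_key:
--         params[current_key] = ", ".join(accumulated_value)
--
--     data.update(params)
--     return data
-- ===== SOURCE B (Python) =====
-- def _span_plain(ts):
--     # longest prefix of tokens without ": ", plus the remaining suffix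
--     run = []
--     for t in ts:
--         if ": " in t:
--             break
--         run.append(t)
--     return run, ts[len(run):]
--
--
-- def _groups(tokens):
--     # drop leading plain tokens, then peel off one "key: val" group at a time
--     _, rest = _span_plain(tokens)
--     if not rest:
--         return []
--     key, val = rest[0].split(": ", 1)
--     run, rest2 = _span_plain(rest[1:])
--     tail = _groups(rest2)
--     if key:
--         return [(key, ", ".join([val] + run))] + tail
--     return tail
--
--
-- def parse_infotext(infotext):
--     data = {}
--     if not infotext:
--         return data
--
--     if "Steps: " in infotext:
--         prompt_part, params_part = infotext.split("Steps: ", 1)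
--         params_part = "Steps: " + params_part
--     else:
--         prompt_part = infotext
--         params_part = ""
--
--     if "Negative prompt: " in prompt_part:
--         positive, negative = prompt_part.split("Negative prompt: ", 1)
--         data['prompt'] = positive.strip().rstrip(',')
--         data['negative_prompt'] = negative.strip().rstrip(',')
--     else:
--         data['prompt'] = prompt_part.strip().rstrip(',')
--         data['negative_prompt'] = ""
--
--     data.update(dict(_groups(params_part.split(", "))))
--     return data
-- ===== Notes on version B (the rewrite author's own statement) =====
-- stated objective: alternative
-- what changed: The stateful token-accumulation loop (current_key / accumulated_value / flush) is replaced by a recursive span-based grouping that peels off one marker token together with its following run of plain tokens at a time; the prompt/negative-prompt/params splitting is unchanged.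
import Mathlib
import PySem

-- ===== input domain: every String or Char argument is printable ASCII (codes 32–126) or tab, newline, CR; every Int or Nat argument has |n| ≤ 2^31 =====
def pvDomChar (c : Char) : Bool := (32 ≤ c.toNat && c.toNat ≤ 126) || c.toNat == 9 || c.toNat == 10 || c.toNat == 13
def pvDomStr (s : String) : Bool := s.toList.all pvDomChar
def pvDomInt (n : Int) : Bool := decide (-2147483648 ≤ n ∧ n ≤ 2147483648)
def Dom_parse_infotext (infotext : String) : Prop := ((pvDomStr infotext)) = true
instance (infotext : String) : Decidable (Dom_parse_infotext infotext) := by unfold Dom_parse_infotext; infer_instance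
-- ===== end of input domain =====

-- B replaces A's stateful token-accumulation loop (current_key / accumulated_value / flush)
-- by a recursive span-based grouping that peels off one marker token together with its
-- following run of plain tokens at a time; objective: alternative decomposition, same cost.

-- ----- helpers shared by both ports: these lines are IDENTICAL in Source A and Source B -----

-- exact hand port of Python's s.rstrip(',') (single strip char): drop trailing ','s
def pvRstripComma (cs : List Char) : List Char := (cs.reverse.dropWhile (· == ',')).reverse

-- s.strip().rstrip(',')
def pvClean (s : String) : String := String.ofList (pvRstripComma (PySem.Str.strip s).toList)

-- the "Steps: " split: returns (prompt_part, params_part)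
def pvSplitSteps (infotext : String) : String × String :=
  if PySem.Str.isIn "Steps: " infotext then
    let pr := (PySem.Str.splitMax? infotext "Steps: " 1).getD []
    (PySem.List.pyGetD pr 0 "", "Steps: " ++ PySem.List.pyGetD pr 1 "")
  else (infotext, "")

-- the prompt / negative_prompt entries of data
def pvHeader (prompt_part : String) : PySem.Dict String String :=
  if PySem.Str.isIn "Negative prompt: " prompt_part then
    let pr := (PySem.Str.splitMax? prompt_part "Negative prompt: " 1).getD []
    ((PySem.Dict.empty).insert "prompt" (pvClean (PySem.List.pyGetD pr 0 ""))).insert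
      "negative_prompt" (pvClean (PySem.List.pyGetD pr 1 ""))
  else
    ((PySem.Dict.empty).insert "prompt" (pvClean prompt_part)).insert "negative_prompt" ""

-- ===== PORT A =====

-- Python truthiness of current_key (None at start, possibly "" later)
def pvTruthy : Option String → Bool
  | none => false
  | some k => k != ""

-- body of A's `for token in tokens:` loop; state = (params, current_key, accumulated_value)
def pvStepA (st : PySem.Dict String String × Option String × List String) (token : String) :
    PySem.Dict String String × Option String × List String :=
  if PySem.Str.isIn ": " token then
    let parts := (PySem.Str.splitMax? token ": " 1).getD []
    let possible_key := PySem.List.pyGetD parts 0 ""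
    let val := PySem.List.pyGetD parts 1 ""
    let params' := if pvTruthy st.2.1 then st.1.insert (st.2.1.getD "") (PySem.Str.join ", " st.2.2) else st.1
    (params', some possible_key, [val])
  else
    if pvTruthy st.2.1 then (st.1, st.2.1, st.2.2 ++ [token]) else st

def parse_infotext (infotext : String) : List (String × String) :=
  if infotext = "" then []
  else
    let pp := pvSplitSteps infotext
    let data := pvHeader pp.1
    let tokens := (PySem.Str.split? pp.2 ", ").getD []   -- sep ", " ≠ "" so split? is always some
    let st := tokens.foldl pvStepA (PySem.Dict.empty, none, [])
    let params := if pvTruthy st.2.1 then st.1.insert (st.2.1.getD "") (PySem.Str.join ", " st.2.2) else st.1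
    (data.update params.items).items

-- ===== PORT B =====

-- Source B _span_plain: longest prefix of tokens without ": ", plus the remaining suffix
def pvSpanPlain : List String → List String × List String
  | [] => ([], [])
  | t :: ts =>
    if PySem.Str.isIn ": " t then ([], t :: ts)
    else
      let p := pvSpanPlain ts
      (t :: p.1, p.2)

-- termination measure for pvGroups (cited in decreasing_by)
theorem pvSpanPlain_snd_length (ts : List String) : (pvSpanPlain ts).2.length ≤ ts.length := by
  induction ts with
  | nil => simp [pvSpanPlain]
  | cons t ts ih =>
    simp only [pvSpanPlain]
    split
    · simp
    · simpa using Nat.le_succ_of_le ih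

-- Source B _groups: drop leading plain tokens, then peel off one marker group at a time
def pvGroups (tokens : List String) : List (String × String) :=
  match h : (pvSpanPlain tokens).2 with
  | [] => []
  | m :: rest' =>
    let parts := (PySem.Str.splitMax? m ": " 1).getD []
    let key := PySem.List.pyGetD parts 0 ""
    let val := PySem.List.pyGetD parts 1 ""
    let sp := pvSpanPlain rest'
    let tail := pvGroups sp.2
    if key != "" then (key, PySem.Str.join ", " ([val] ++ sp.1)) :: tail else tail
termination_by tokens.length
decreasing_by
  calc (pvSpanPlain rest').2.length ≤ rest'.length := pvSpanPlain_snd_length rest'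
    _ < (m :: rest').length := by simp
    _ = (pvSpanPlain tokens).2.length := by rw [h]
    _ ≤ tokens.length := pvSpanPlain_snd_length tokens

def parse_infotext_alt (infotext : String) : List (String × String) :=
  if infotext = "" then []
  else
    let pp := pvSplitSteps infotext
    let data := pvHeader pp.1
    let tokens := (PySem.Str.split? pp.2 ", ").getD []
    (data.update (PySem.Dict.ofList (pvGroups tokens)).items).items

-- ===== PRECONDITION & SPEC =====
def Spec_parse_infotext (infotext : String) (out : List (String × String)) : Prop := out = parse_infotext_alt infotext
instance (infotext : String) (out : List (String × String)) : Decidable (Spec_parse_infotext infotext out) := by unfold Spec_parse_infotext; infer_instance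

-- ===== CLAIM (what is proved, stated in full; the proofs are below) =====
def Claim_equal_parse_infotext : Prop := ∀ (infotext : String), Dom_parse_infotext infotext → Spec_parse_infotext infotext (parse_infotext infotext)

-- ===== LEMMAS AND PROOFS =====

-- the pending group of A's loop state, flushed: emitted only when the key is truthy
def pvFlush (ck : Option String) (acc : List String) : List (String × String) :=
  match ck with
  | none => []
  | some k => if k = "" then [] else [(k, PySem.Str.join ", " acc)]

-- the (key, value) pairs still to be emitted from state (ck, acc) over the remaining tokens
def pvPairs (ck : Option String) (acc : List String) : List String → List (String × String)
  | [] => pvFlush ck acc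
  | t :: ts =>
    if PySem.Str.isIn ": " t then
      let parts := (PySem.Str.splitMax? t ": " 1).getD []
      pvFlush ck acc ++
        pvPairs (some (PySem.List.pyGetD parts 0 "")) [PySem.List.pyGetD parts 1 ""] ts
    else
      match ck with
      | none => pvPairs none acc ts
      | some k => pvPairs (some k) (acc ++ [t]) ts

def pvIns (d : PySem.Dict String String) (p : String × String) : PySem.Dict String String :=
  d.insert p.1 p.2

def pvFin (st : PySem.Dict String String × Option String × List String) : PySem.Dict String String :=
  if pvTruthy st.2.1 then st.1.insert (st.2.1.getD "") (PySem.Str.join ", " st.2.2) else st.1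

-- with a pending empty key the accumulated list can never be emitted
theorem pvPairs_empty_key_acc (ts : List String) : ∀ acc acc',
    pvPairs (some "") acc ts = pvPairs (some "") acc' ts := by
  induction ts with
  | nil => intro acc acc'; simp [pvPairs, pvFlush]
  | cons t ts ih =>
    intro acc acc'
    simp only [pvPairs]
    split
    · simp [pvFlush]
    · exact ih _ _

-- A's loop, finalized, inserts exactly the pvPairs of its state
theorem pvFin_foldl (ts : List String) : ∀ d ck acc,
    pvFin (ts.foldl pvStepA (d, ck, acc)) = (pvPairs ck acc ts).foldl pvIns d := by
  induction ts with
  | nil =>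
    intro d ck acc
    cases ck with
    | none => simp [pvFin, pvPairs, pvFlush, pvTruthy]
    | some k =>
      by_cases hk : k = "" <;>
        simp [pvFin, pvPairs, pvFlush, pvTruthy, pvIns, hk]
  | cons t ts ih =>
    intro d ck acc
    simp only [List.foldl_cons, pvStepA, pvPairs]
    split
    · -- marker token: flush the pending group, start a new one
      rw [List.foldl_append, ih]
      congr 1
      cases ck with
      | none => simp [pvTruthy, pvFlush]
      | some k =>
        by_cases hk : k = "" <;> simp [pvTruthy, pvFlush, pvIns, hk]
    · -- plain token
      cases ck with
      | none =>
        simp only [pvTruthy]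
        rw [if_neg Bool.false_ne_true, ih]
      | some k =>
        by_cases hk : k = ""
        · subst hk
          simp only [pvTruthy, bne_self_eq_false]
          rw [if_neg Bool.false_ne_true, ih, pvPairs_empty_key_acc ts (acc ++ [t]) acc]
        · have hkt : (k != "") = true := bne_iff_ne.mpr hk
          simp only [pvTruthy]
          rw [if_pos hkt, ih]

-- pvSpanPlain splits the list
theorem pvSpanPlain_append (ts : List String) :
    (pvSpanPlain ts).1 ++ (pvSpanPlain ts).2 = ts := by
  induction ts with
  | nil => simp [pvSpanPlain]
  | cons t ts ih =>
    simp only [pvSpanPlain]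
    split
    · simp
    · simpa using ih

theorem pvSpanPlain_fst_plain (ts : List String) :
    ∀ t ∈ (pvSpanPlain ts).1, PySem.Str.isIn ": " t = false := by
  induction ts with
  | nil => simp [pvSpanPlain]
  | cons t ts ih =>
    simp only [pvSpanPlain]
    split
    · simp
    · next hm =>
      intro u hu
      simp only [List.mem_cons] at hu
      rcases hu with rfl | hu
      · simpa using hm
      · exact ih u hu

theorem pvSpanPlain_snd_head (ts : List String) (m : String) (r : List String)
    (h : (pvSpanPlain ts).2 = m :: r) : PySem.Str.isIn ": " m = true := by
  induction ts with
  | nil => simp [pvSpanPlain] at h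
  | cons t ts ih =>
    simp only [pvSpanPlain] at h
    split at h
    · next hm => cases h; simpa using hm
    · exact ih h

-- plain tokens are skipped while no key is pending
theorem pvPairs_none_skip (pre : List String) (rest : List String) (acc : List String)
    (hpl : ∀ t ∈ pre, PySem.Str.isIn ": " t = false) :
    pvPairs none acc (pre ++ rest) = pvPairs none acc rest := by
  induction pre with
  | nil => simp
  | cons t pre ih =>
    have ht := hpl t (by simp)
    simp only [List.cons_append, pvPairs, ht]
    exact ih fun u hu => hpl u (by simp [hu])

-- plain tokens are appended to the pending accumulator
theorem pvPairs_some_run (run : List String) : ∀ (rest : List String) (k : String) (acc : List String),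
    (∀ t ∈ run, PySem.Str.isIn ": " t = false) →
    pvPairs (some k) acc (run ++ rest) = pvPairs (some k) (acc ++ run) rest := by
  induction run with
  | nil => simp
  | cons t run ih =>
    intro rest k acc hpl
    have ht := hpl t (by simp)
    simp only [List.cons_append, pvPairs, ht]
    rw [ih rest k (acc ++ [t]) (fun u hu => hpl u (by simp [hu]))]
    simp

-- at a group boundary (end of tokens or a marker token) the pending group flushes
theorem pvPairs_flush_at (k : String) (acc : List String) (rest2 : List String)
    (h : rest2 = [] ∨ ∃ m r, rest2 = m :: r ∧ PySem.Str.isIn ": " m = true) :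
    pvPairs (some k) acc rest2 = pvFlush (some k) acc ++ pvPairs none [] rest2 := by
  rcases h with rfl | ⟨m, r, rfl, hm⟩
  · simp [pvPairs, pvFlush]
  · simp only [pvPairs, hm]
    simp [pvFlush]

-- B's recursive grouping produces exactly the pairs of A's loop
theorem pvGroups_eq_pvPairs_aux (n : Nat) : ∀ tokens : List String, tokens.length ≤ n →
    pvGroups tokens = pvPairs none [] tokens := by
  induction n with
  | zero =>
    intro tokens hlen
    have : tokens = [] := List.eq_nil_of_length_eq_zero (Nat.le_zero.mp hlen)
    subst this
    rw [pvGroups]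
    simp [pvSpanPlain, pvPairs, pvFlush]
  | succ n ihn =>
    intro tokens hlen
    rw [pvGroups]
    split
    · next h =>
      conv_rhs => rw [← pvSpanPlain_append tokens, h,
        pvPairs_none_skip (pvSpanPlain tokens).1 [] [] (pvSpanPlain_fst_plain tokens)]
      simp [pvPairs, pvFlush]
    · next m rest' h =>
      have hm : PySem.Str.isIn ": " m = true := pvSpanPlain_snd_head tokens m rest' h
      have hlen2 : (pvSpanPlain rest').2.length ≤ n := by
        have h1 := pvSpanPlain_snd_length rest'
        have h2 := pvSpanPlain_snd_length tokens
        rw [h] at h2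
        simp only [List.length_cons] at h2
        omega
      conv_rhs => rw [← pvSpanPlain_append tokens,
        pvPairs_none_skip (pvSpanPlain tokens).1 (pvSpanPlain tokens).2 []
          (pvSpanPlain_fst_plain tokens), h]
      simp only [pvPairs, hm, if_pos]
      conv_rhs => rw [← pvSpanPlain_append rest',
        pvPairs_some_run (pvSpanPlain rest').1 (pvSpanPlain rest').2 _ _
          (pvSpanPlain_fst_plain rest')]
      have hbd : (pvSpanPlain rest').2 = [] ∨
          ∃ m2 r2, (pvSpanPlain rest').2 = m2 :: r2 ∧ PySem.Str.isIn ": " m2 = true := by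
        cases h2 : (pvSpanPlain rest').2 with
        | nil => exact Or.inl rfl
        | cons m2 r2 => exact Or.inr ⟨m2, r2, rfl, pvSpanPlain_snd_head rest' m2 r2 h2⟩
      rw [pvPairs_flush_at _ _ _ hbd, ← ihn (pvSpanPlain rest').2 hlen2]
      set key := PySem.List.pyGetD ((PySem.Str.splitMax? m ": " 1).getD []) 0 "" with hkey
      by_cases hk : key = "" <;> simp [pvFlush, hk]

theorem pvGroups_eq_pvPairs (tokens : List String) :
    pvGroups tokens = pvPairs none [] tokens :=
  pvGroups_eq_pvPairs_aux tokens.length tokens le_rfl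

-- the two params dicts agree
theorem pvParams_eq (tokens : List String) :
    (if pvTruthy (tokens.foldl pvStepA (PySem.Dict.empty, none, [])).2.1 then
        (tokens.foldl pvStepA (PySem.Dict.empty, none, [])).1.insert
          ((tokens.foldl pvStepA (PySem.Dict.empty, none, [])).2.1.getD "")
          (PySem.Str.join ", " (tokens.foldl pvStepA (PySem.Dict.empty, none, [])).2.2)
      else (tokens.foldl pvStepA (PySem.Dict.empty, none, [])).1) =
      PySem.Dict.ofList (pvGroups tokens) := by
  have h1 : pvFin (tokens.foldl pvStepA (PySem.Dict.empty, none, [])) =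
      (pvPairs none [] tokens).foldl pvIns PySem.Dict.empty :=
    pvFin_foldl tokens PySem.Dict.empty none []
  simp only [pvFin] at h1
  rw [pvGroups_eq_pvPairs]
  exact h1

-- ===== VERDICT (by name: the statement is the Claim_ definition above) =====
theorem parse_infotext_spec : Claim_equal_parse_infotext := by
  intro infotext _
  unfold Spec_parse_infotext parse_infotext parse_infotext_alt
  by_cases h : infotext = ""
  · simp [h]
  · simp only [if_neg h]
    rw [pvParams_eq ((PySem.Str.split? (pvSplitSteps infotext).2 ", ").getD [])]
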